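-- pv_equiv track=rewrite | github.com/manvithaOnGit/Image-Steganography-Using-RaspBerryPie | HE.py | pack_symbols_6bit
-- ===== SOURCE A (Python) =====
-- from typing import List, Tuple
--
-- def pack_symbols_6bit(symbols: List[int], k: int) -> List[int]:
--     """
--     Pack list of 6-bit symbols (0..63) into integers, k symbols per integer.
--     Example for k=4: each packed integer holds 24 bits.
--     Returns list of packed integers.
--     """
--     if k <= 0:
--         raise ValueError("k must be > 0")
--     packed = []
--     for i in range(0, len(symbols), k):
--         group = symbols[i:i + k]
--         val = 0
--         for j, s in enumerate(group):
--             if not (0 <= s < 64):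
--                 raise ValueError("Symbols must be 0..63 (6-bit)")
--             val |= (s & 0x3F) << (6 * j)
--         packed.append(val)
--     return packed
-- ===== SOURCE B (Python) =====
-- def pack_symbols_6bit(symbols, k):
--     if k <= 0:
--         raise ValueError("k must be > 0")
--     packed = []
--     val = 0
--     for i, s in enumerate(symbols):
--         if not (0 <= s < 64):
--             raise ValueError("Symbols must be 0..63 (6-bit)")
--         val |= (s & 0x3F) << (6 * (i % k))
--         if i % k == k - 1:
--             packed.append(val)
--             val = 0
--     if symbols and len(symbols) % k != 0:
--         packed.append(val)
--     return packed
-- ===== Notes on version B (the rewrite author's own statement) =====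
-- stated objective: alternative
-- what changed: Replaced A's nested structure (outer loop over group slices with an inner enumerate loop) by a single flat pass over the symbols that accumulates into a running value keyed by i % k, flushing on group boundaries and appending the trailing partial value after the loop.
import Mathlib
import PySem

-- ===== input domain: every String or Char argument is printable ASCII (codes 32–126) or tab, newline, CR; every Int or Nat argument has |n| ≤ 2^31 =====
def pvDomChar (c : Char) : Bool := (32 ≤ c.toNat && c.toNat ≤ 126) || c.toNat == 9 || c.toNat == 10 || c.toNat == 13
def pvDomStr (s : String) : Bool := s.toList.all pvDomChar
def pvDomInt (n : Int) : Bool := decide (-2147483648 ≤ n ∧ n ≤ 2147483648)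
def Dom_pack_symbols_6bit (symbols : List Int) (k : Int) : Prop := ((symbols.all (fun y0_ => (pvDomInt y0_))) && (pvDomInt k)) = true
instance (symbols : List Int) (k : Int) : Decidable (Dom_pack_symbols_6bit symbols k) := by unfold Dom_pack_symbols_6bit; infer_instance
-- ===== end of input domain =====

-- B replaces A's nested group-slicing loops by a single flat pass with an i%k accumulator (alternative decomposition, same cost).


-- ===== PORT A =====
-- inner loop `for j, s in enumerate(group): val |= (s & 0x3F) << (6*j)` (accumulator val)
def pvInnerA : List Int → Nat → Int → Int
  | [], _, val => val
  | s :: t, j, val => pvInnerA t (j + 1) (PySem.Int.bor val (PySem.Int.band s 63 <<< (6 * j)))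

-- outer loop `for i in range(0, len(symbols), k)`: each step packs the group symbols[i:i+k]
-- (= the next km+1 elements, where km + 1 is the positive step k) and appends its value.
def pvLoopA : List Int → Nat → List Int → List Int
  | [], _, packed => packed
  | s :: t, km, packed => pvLoopA (t.drop km) km (packed ++ [pvInnerA (s :: t.take km) 0 0])
termination_by rest _ _ => rest.length
decreasing_by simp

def pack_symbols_6bit (symbols : List Int) (k : Int) : List Int :=
  if k ≤ 0 then []   -- Python raises ValueError here; excluded by Pre_
  else pvLoopA symbols (k.toNat - 1) []

-- ===== PORT B =====
-- flat pass `for i, s in enumerate(symbols)` over state (val, packed); km + 1 = k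
def pvLoopB : List Int → Nat → Nat → Int → List Int → Int × List Int
  | [], _, _, val, packed => (val, packed)
  | s :: t, i, km, val, packed =>
      let val' := PySem.Int.bor val (PySem.Int.band s 63 <<< (6 * (i % (km + 1))))
      if i % (km + 1) = km then pvLoopB t (i + 1) km 0 (packed ++ [val'])
      else pvLoopB t (i + 1) km val' packed

def pack_symbols_6bit_alt (symbols : List Int) (k : Int) : List Int :=
  if k ≤ 0 then []   -- Python raises ValueError here; excluded by Pre_
  else
    let km := k.toNat - 1
    let r := pvLoopB symbols 0 km 0 []
    if symbols ≠ [] ∧ symbols.length % (km + 1) ≠ 0 then r.2 ++ [r.1] else r.2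

-- ===== PRECONDITION & SPEC =====
-- Pre_ excludes exactly the inputs where A raises ValueError: k ≤ 0 or a symbol outside 0..63.
def Pre_pack_symbols_6bit (symbols : List Int) (k : Int) : Prop :=
  0 < k ∧ ∀ s ∈ symbols, 0 ≤ s ∧ s < 64
instance (symbols : List Int) (k : Int) : Decidable (Pre_pack_symbols_6bit symbols k) := by
  unfold Pre_pack_symbols_6bit; infer_instance
def pvWitness_pack_symbols_6bit : List Int × Int := ([1, 2, 3, 4, 5], 2)

def Spec_pack_symbols_6bit (symbols : List Int) (k : Int) (out : List Int) : Prop := out = pack_symbols_6bit_alt symbols k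
instance (symbols : List Int) (k : Int) (out : List Int) : Decidable (Spec_pack_symbols_6bit symbols k out) := by unfold Spec_pack_symbols_6bit; infer_instance

-- ===== CLAIM (what is proved, stated in full; the proofs are below) =====
def Claim_equal_pack_symbols_6bit : Prop := ∀ (symbols : List Int) (k : Int), Dom_pack_symbols_6bit symbols k → Pre_pack_symbols_6bit symbols k → Spec_pack_symbols_6bit symbols k (pack_symbols_6bit symbols k)

-- ===== LEMMAS AND PROOFS =====

-- pvLoopB depends on its index only modulo km+1
theorem pvLoopB_mod (rest : List Int) (i i' km : Nat) (val : Int) (packed : List Int)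
    (h : i % (km + 1) = i' % (km + 1)) :
    pvLoopB rest i km val packed = pvLoopB rest i' km val packed := by
  induction rest generalizing i i' val packed with
  | nil => rfl
  | cons s t ih =>
      simp only [pvLoopB, h]
      have h1 : (i + 1) % (km + 1) = (i' + 1) % (km + 1) := by
        rw [Nat.add_mod i 1, Nat.add_mod i' 1, h]
      split
      · exact ih (i + 1) (i' + 1) 0 _ h1
      · exact ih (i + 1) (i' + 1) _ _ h1

-- running pvLoopB from mid-group position j completes the current group (take) and
-- continues from 0, or ends with the partial value if the input runs out
theorem pvLoopB_group (km : Nat) (rest : List Int) (j : Nat) (val : Int) (packed : List Int)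
    (hj : j ≤ km) :
    pvLoopB rest j km val packed =
      if km + 1 - j ≤ rest.length then
        pvLoopB (rest.drop (km + 1 - j)) 0 km 0 (packed ++ [pvInnerA (rest.take (km + 1 - j)) j val])
      else (pvInnerA rest j val, packed) := by
  induction rest generalizing j val packed with
  | nil =>
      have hn : ¬ (km + 1 - j ≤ ([] : List Int).length) := by simp; omega
      rw [if_neg hn]
      rfl
  | cons s t ih =>
      have hjj : j % (km + 1) = j := Nat.mod_eq_of_lt (by omega)
      by_cases hk : j = km
      · subst hk
        have h1 : j + 1 - j = 1 := by omega
        have hle : j + 1 - j ≤ (s :: t).length := by simp [h1]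
        rw [if_pos hle, h1]
        simp only [List.drop_succ_cons, List.drop_zero, List.take_succ_cons, List.take_zero]
        simp only [pvLoopB, hjj, if_true]
        rw [pvLoopB_mod t (j + 1) 0 j 0 _ (by simp)]
        rfl
      · have hjlt : j < km := lt_of_le_of_ne hj hk
        have hcond : ¬ (j % (km + 1) = km) := by rw [hjj]; exact hk
        simp only [pvLoopB, hjj]
        rw [if_neg hk, ih (j + 1) _ packed (by omega)]
        have e1 : km + 1 - (j + 1) = km - j := by omega
        have e2 : km + 1 - j = (km - j) + 1 := by omega
        rw [e1, e2]
        simp only [List.length_cons, List.drop_succ_cons, List.take_succ_cons, pvInnerA]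
        have e3 : (km - j + 1 ≤ t.length + 1) ↔ (km - j ≤ t.length) := by omega
        simp only [e3]

-- main invariant: the flat pass plus trailing-partial append equals the group-by-group loop
theorem pvLoop_eq (km : Nat) : ∀ n (rest : List Int), rest.length ≤ n → ∀ packed,
    pvLoopA rest km packed =
      (if rest ≠ [] ∧ rest.length % (km + 1) ≠ 0
        then (pvLoopB rest 0 km 0 packed).2 ++ [(pvLoopB rest 0 km 0 packed).1]
        else (pvLoopB rest 0 km 0 packed).2) := by
  intro n
  induction n with
  | zero =>
      intro rest h packed
      have : rest = [] := List.eq_nil_of_length_eq_zero (by omega)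
      subst this
      rw [if_neg (by simp), pvLoopA.eq_1]
      rfl
  | succ n ih =>
      intro rest h packed
      match rest with
      | [] =>
        rw [if_neg (by simp), pvLoopA.eq_1]
        rfl
      | s :: t =>
        rw [pvLoopB_group km (s :: t) 0 0 packed (Nat.zero_le km)]
        simp only [Nat.sub_zero]
        have htake : (s :: t).take (km + 1) = s :: t.take km := by simp
        have hdrop : (s :: t).drop (km + 1) = t.drop km := by simp
        have hA : pvLoopA (s :: t) km packed =
            pvLoopA (t.drop km) km (packed ++ [pvInnerA (s :: t.take km) 0 0]) := by
          rw [pvLoopA.eq_2]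
        by_cases hle : km + 1 ≤ (s :: t).length
        · rw [if_pos hle, hdrop, htake]
          rw [hA, ih (t.drop km) (by have := h; simp only [List.length_cons] at this; simp only [List.length_drop]; omega) (packed ++ [pvInnerA (s :: t.take km) 0 0])]
          have hlen : (t.drop km).length = (s :: t).length - (km + 1) := by simp
          have hmod : (t.drop km).length % (km + 1) = (s :: t).length % (km + 1) := by
            rw [hlen]
            conv_rhs => rw [← Nat.sub_add_cancel hle]
            rw [Nat.add_mod_right]
          have hcond : ((t.drop km) ≠ [] ∧ (t.drop km).length % (km + 1) ≠ 0) ↔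
              ((s :: t) ≠ [] ∧ (s :: t).length % (km + 1) ≠ 0) := by
            constructor
            · rintro ⟨_, h2⟩
              exact ⟨by simp, by rw [← hmod]; exact h2⟩
            · rintro ⟨_, h2⟩
              rw [hmod] at *
              refine ⟨?_, h2⟩
              intro hnil
              have h0 : (t.drop km).length = 0 := by rw [hnil]; rfl
              have : (s :: t).length = km + 1 := by omega
              rw [this] at h2
              exact h2 (Nat.mod_self _)
          simp only [hcond]
        · rw [if_neg hle]
          have hlt : (s :: t).length < km + 1 := by omega
          have htake' : t.take km = t := List.take_of_length_le (by simp at hlt; omega)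
          have hdrop' : t.drop km = [] := List.drop_eq_nil_of_le (by simp at hlt; omega)
          rw [hA, htake', hdrop']
          have hmod : (s :: t).length % (km + 1) = (s :: t).length := Nat.mod_eq_of_lt hlt
          rw [if_pos (by rw [hmod]; exact ⟨by simp, by simp⟩)]
          rw [pvLoopA.eq_1]

-- ===== VERDICT (by name: the statement is the Claim_ definition above) =====
theorem pack_symbols_6bit_spec : Claim_equal_pack_symbols_6bit := by
  intro symbols k _ hpre
  obtain ⟨hk0, _⟩ := hpre
  unfold Spec_pack_symbols_6bit pack_symbols_6bit pack_symbols_6bit_alt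
  rw [if_neg (by omega), if_neg (by omega)]
  exact pvLoop_eq (k.toNat - 1) symbols.length symbols (le_refl _) []
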